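-- pv_equiv track=rewrite | github.com/kseniya-chadovich/owl | scheduler/helpers.py | expand_day_tokens
-- ===== SOURCE A (Python) =====
-- def expand_day_tokens(s):
--     out, i = [], 0
--     while i < len(s):
--         if s[i] == "T" and i + 1 < len(s) and s[i+1] == "h":
--             out.append("Th"); i += 2
--         else:
--             out.append(s[i]); i += 1
--     return out
-- ===== SOURCE B (Python) =====
-- import re
--
-- def expand_day_tokens(s):
--     return re.findall(r'Th|[\s\S]', s)
-- ===== Notes on version B (the rewrite author's own statement) =====
-- stated objective: idiomatic
-- what changed: Replaces the manual index/while loop with a single regex tokenization re.findall(r'Th|[\s\S]', s), relying on leftmost alternation to merge the two-character day token.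
import Mathlib
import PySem

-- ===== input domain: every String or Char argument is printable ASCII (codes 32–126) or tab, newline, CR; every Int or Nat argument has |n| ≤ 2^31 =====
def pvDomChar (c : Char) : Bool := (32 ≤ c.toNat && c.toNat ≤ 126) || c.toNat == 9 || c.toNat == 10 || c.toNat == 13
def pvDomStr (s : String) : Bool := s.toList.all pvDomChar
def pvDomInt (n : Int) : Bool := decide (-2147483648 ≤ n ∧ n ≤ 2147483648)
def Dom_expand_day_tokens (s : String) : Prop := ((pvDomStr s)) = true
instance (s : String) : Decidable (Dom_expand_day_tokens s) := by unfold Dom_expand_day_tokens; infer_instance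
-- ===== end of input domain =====

-- B replaces A's manual index/while loop with one regex tokenization (re.findall(r'Th|[\s\S]', s)); objective: idiomatic, same cost.

-- ===== PORT A =====
-- A's while loop: index i, accumulator out, s[i] comparisons; literal transliteration over s.toList.
def pvA_loop (cs : List Char) (i : Nat) (out : List String) : List String :=
  if h : i < cs.length then
    if hT : cs[i] = 'T' ∧ ∃ h1 : i + 1 < cs.length, cs[i+1] = 'h' then
      pvA_loop cs (i + 2) (out ++ ["Th"])
    else
      pvA_loop cs (i + 1) (out ++ [String.ofList [cs[i]]])
  else out
termination_by cs.length - i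

def expand_day_tokens (s : String) : List String :=
  pvA_loop s.toList 0 []

-- ===== PORT B =====
-- B is a single call re.findall(r'Th|[\s\S]', s); the regex engine's leftmost-alternation scan is ported
-- exactly: at each position try the two-char token 'Th', else consume one character ([\s\S] matches ANY char).
def pvB_go (cs : List Char) : List String :=
  match cs with
  | [] => []
  | [c] => [String.ofList [c]]
  | c1 :: c2 :: rest =>
    if c1 = 'T' ∧ c2 = 'h' then "Th" :: pvB_go rest
    else String.ofList [c1] :: pvB_go (c2 :: rest)
termination_by cs.length

def expand_day_tokens_alt (s : String) : List String :=
  pvB_go s.toList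

-- ===== PRECONDITION & SPEC =====
def Spec_expand_day_tokens (s : String) (out : List String) : Prop := out = expand_day_tokens_alt s
instance (s : String) (out : List String) : Decidable (Spec_expand_day_tokens s out) := by unfold Spec_expand_day_tokens; infer_instance

-- ===== CLAIM (what is proved, stated in full; the proofs are below) =====
def Claim_equal_expand_day_tokens : Prop := ∀ (s : String), Dom_expand_day_tokens s → Spec_expand_day_tokens s (expand_day_tokens s)

-- ===== LEMMAS AND PROOFS =====

theorem pvB_go_cons (c : Char) (rest : List Char)
    (h : ¬ (c = 'T' ∧ ∃ r, rest = 'h' :: r)) :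
    pvB_go (c :: rest) = String.ofList [c] :: pvB_go rest := by
  cases rest with
  | nil => simp [pvB_go]
  | cons c2 r =>
    have : ¬ (c = 'T' ∧ c2 = 'h') := by
      rintro ⟨h1, h2⟩; exact h ⟨h1, r, by rw [h2]⟩
    simp [pvB_go, this]

theorem pvA_loop_eq (cs : List Char) (i : Nat) (out : List String) :
    pvA_loop cs i out = out ++ pvB_go (cs.drop i) := by
  by_cases h : i < cs.length
  · rw [pvA_loop]
    simp only [h, dif_pos]
    have hdrop : cs.drop i = cs[i] :: cs.drop (i + 1) := (List.getElem_cons_drop h).symm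
    by_cases hT : cs[i] = 'T' ∧ ∃ h1 : i + 1 < cs.length, cs[i+1] = 'h'
    · obtain ⟨hc, h1, hh⟩ := hT
      have hdrop1 : cs.drop (i + 1) = cs[i+1] :: cs.drop (i + 2) := (List.getElem_cons_drop h1).symm
      rw [dif_pos ⟨hc, h1, hh⟩, pvA_loop_eq cs (i + 2) (out ++ ["Th"])]
      rw [hdrop, hdrop1, hc, hh]
      cases hrest : cs.drop (i + 2) with
      | nil => simp [pvB_go]
      | cons a r => simp [pvB_go]
    · rw [dif_neg hT, pvA_loop_eq cs (i + 1) (out ++ [String.ofList [cs[i]]])]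
      rw [hdrop, pvB_go_cons]
      · simp
      · rintro ⟨hc, r, hr⟩
        apply hT
        refine ⟨hc, ?_, ?_⟩
        · have := congrArg List.length hr
          simp [List.length_drop] at this
          omega
        · have h1 : i + 1 < cs.length := by
            have := congrArg List.length hr
            simp [List.length_drop] at this
            omega
          have h2 : (cs.drop (i+1)).head? = some 'h' := by rw [hr]; rfl
          rw [List.head?_drop, List.getElem?_eq_getElem h1] at h2
          exact Option.some_inj.mp h2
  · rw [pvA_loop]
    simp [h, pvB_go, List.drop_eq_nil_of_le (le_of_not_gt h)]
termination_by cs.length - i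

-- ===== VERDICT (by name: the statement is the Claim_ definition above) =====
theorem expand_day_tokens_spec : Claim_equal_expand_day_tokens := by
  intro s _
  unfold Spec_expand_day_tokens expand_day_tokens expand_day_tokens_alt
  simpa using pvA_loop_eq s.toList 0 []
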